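-- pv_equiv track=rewrite | github.com/richardcmckinney/ai-compute-intelligence | src/aci/ingestion/connectors/github.py | _infer_environment
-- ===== SOURCE A (Python) =====
-- def _infer_environment(labels: list[str]) -> str:
--     lowered = [label.lower() for label in labels]
--     if any("prod" in label for label in lowered):
--         return "production"
--     if any("stage" in label for label in lowered):
--         return "staging"
--     if any("dev" in label or "test" in label for label in lowered):
--         return "development"
--     return "unknown"
-- ===== SOURCE B (Python) =====
-- _ENV_TABLE = ["unknown", "development", "staging", "production"]
--
--
-- def _score(label):
--     low = label.lower()
--     if "prod" in low:
--         return 3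
--     if "stage" in low:
--         return 2
--     if "dev" in low or "test" in low:
--         return 1
--     return 0
--
--
-- def _infer_environment(labels: list[str]) -> str:
--     best = max(map(_score, labels), default=0)
--     return _ENV_TABLE[best]
-- ===== Notes on version B (the rewrite author's own statement) =====
-- stated objective: alternative
-- what changed: Replaced the three prioritized any()-substring scans by a score-and-reduce scheme: each label is mapped to a numeric priority, the maximum is taken over all labels, and the answer is read from a lookup table indexed by that maximum.
import Mathlib
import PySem

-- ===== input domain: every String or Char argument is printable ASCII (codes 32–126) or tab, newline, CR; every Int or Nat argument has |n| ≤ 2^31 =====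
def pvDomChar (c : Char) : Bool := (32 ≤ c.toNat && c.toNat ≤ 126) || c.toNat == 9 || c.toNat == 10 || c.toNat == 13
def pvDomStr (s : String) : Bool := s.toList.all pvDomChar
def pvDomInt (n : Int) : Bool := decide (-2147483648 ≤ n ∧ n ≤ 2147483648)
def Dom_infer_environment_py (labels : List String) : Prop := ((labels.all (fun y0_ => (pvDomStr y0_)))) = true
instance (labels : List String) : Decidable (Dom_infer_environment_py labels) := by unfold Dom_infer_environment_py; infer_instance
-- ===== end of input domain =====

-- B replaces the three prioritized any()-scans by a score-per-label + max reduction + table lookup; alternative decomposition, same cost.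

-- ===== PORT A =====
def infer_environment_py (labels : List String) : String :=
  let lowered := labels.map PySem.Str.lower
  if lowered.any (fun label => PySem.Str.isIn "prod" label) then "production"
  else if lowered.any (fun label => PySem.Str.isIn "stage" label) then "staging"
  else if lowered.any (fun label => PySem.Str.isIn "dev" label || PySem.Str.isIn "test" label) then "development"
  else "unknown"

-- ===== PORT B =====
def pvEnvTable : List String := ["unknown", "development", "staging", "production"]

def pvScore (label : String) : Nat :=
  let low := PySem.Str.lower label
  if PySem.Str.isIn "prod" low then 3
  else if PySem.Str.isIn "stage" low then 2
  else if PySem.Str.isIn "dev" low || PySem.Str.isIn "test" low then 1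
  else 0

def infer_environment_py_alt (labels : List String) : String :=
  let best := (labels.map pvScore).foldl max 0   -- max(map(_score, labels), default=0)
  -- _ENV_TABLE[best]: best is always in [0,3], so Python indexing never raises; .getD "" is unreachable
  (PySem.List.pyGet? pvEnvTable (Int.ofNat best)).getD ""

-- ===== PRECONDITION & SPEC =====
def Spec_infer_environment_py (labels : List String) (out : String) : Prop := out = infer_environment_py_alt labels
instance (labels : List String) (out : String) : Decidable (Spec_infer_environment_py labels out) := by unfold Spec_infer_environment_py; infer_instance

-- ===== CLAIM (what is proved, stated in full; the proofs are below) =====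
def Claim_equal_infer_environment_py : Prop := ∀ (labels : List String), Dom_infer_environment_py labels → Spec_infer_environment_py labels (infer_environment_py labels)

-- ===== LEMMAS AND PROOFS =====

theorem foldl_max_acc (l : List Nat) (a : Nat) : l.foldl max a = max a (l.foldl max 0) := by
  induction l generalizing a with
  | nil => simp
  | cons h t ih =>
    simp only [List.foldl_cons]
    rw [ih (max a h), ih (max 0 h)]
    omega

-- max of two priority encodings is the priority encoding of the or'd flags
theorem max_chain (p q r p' q' r' : Bool) :
    max (if p = true then 3 else if q = true then 2 else if r = true then 1 else 0)
        (if p' = true then 3 else if q' = true then 2 else if r' = true then 1 else 0)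
      = (if (p || p') = true then 3 else if (q || q') = true then 2 else if (r || r') = true then 1 else 0) := by
  cases p <;> cases q <;> cases r <;> cases p' <;> cases q' <;> cases r' <;> decide

-- The max of the per-label scores equals the priority chain of the three any()-scans.
theorem bigmax_eq (labels : List String) :
    (labels.map pvScore).foldl max 0 =
      (if labels.any (fun l => PySem.Str.isIn "prod" (PySem.Str.lower l)) then 3
       else if labels.any (fun l => PySem.Str.isIn "stage" (PySem.Str.lower l)) then 2
       else if labels.any (fun l => PySem.Str.isIn "dev" (PySem.Str.lower l) || PySem.Str.isIn "test" (PySem.Str.lower l)) then 1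
       else 0) := by
  induction labels with
  | nil => simp
  | cons h t ih =>
    simp only [List.map_cons, List.foldl_cons, List.any_cons]
    rw [foldl_max_acc, Nat.zero_max, ih]
    simp only [pvScore]
    rw [max_chain]
    simp [Bool.or_assoc]

-- ===== VERDICT (by name: the statement is the Claim_ definition above) =====
theorem infer_environment_py_spec : Claim_equal_infer_environment_py := by
  intro labels _
  unfold Spec_infer_environment_py infer_environment_py infer_environment_py_alt
  simp only [bigmax_eq, List.any_map, Function.comp_def]
  split_ifs <;> rfl
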